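-- pv_equiv track=rewrite | github.com/andprogrammer/daily-coding-problem | 383/main.py | embolden
-- ===== SOURCE A (Python) =====
-- def embolden(s, lst):
--     bold = [False for i in range(len(s))]
--     for x in lst:
--         for i in range(len(s) - len(x) + 1):
--             if s[i:i + len(x)] == x:
--                 for j in range(i, i + len(x)):
--                     bold[j] = True
--     output = ''
--     i = 0
--     while i < len(bold):
--         if bold[i]:
--             output += '<b>'
--             while bold[i] and i < len(bold):
--                 output += s[i]
--                 i += 1
--             output += '</b>'
--             continue
--         else:
--             #     output += '<b>'
--             output += s[i]
--             #     output += '</b>'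
--         i += 1
--     return output
-- ===== SOURCE B (Python) =====
-- def embolden(s, lst):
--     # One fused left-to-right pass: keep `end`, the furthest index (exclusive)
--     # any match starting at or before the current position reaches; emit tags
--     # when the "inside bold" state flips.  No boolean mask, no second scan.
--     n = len(s)
--     words = [x for x in lst if x]
--     output = ''
--     end = 0
--     bolded = False
--     for i in range(n):
--         for x in words:
--             if s.startswith(x, i):
--                 e = i + len(x)
--                 if e > end:
--                     end = e
--         if not bolded and i < end:
--             output += '<b>'
--             bolded = True
--         elif bolded and i >= end:
--             output += '</b>'
--             bolded = False
--         output += s[i]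
--     if bolded:
--         output += '</b>'
--     return output
-- ===== Notes on version B (the rewrite author's own statement) =====
-- stated objective: alternative
-- what changed: A fills a per-character boolean mask with three nested loops (word x window slice comparison x range-marking) and then re-scans the mask with a two-level while loop to insert tags; B makes one fused left-to-right pass that keeps only the furthest reach of any match started so far and emits <b>/</b> exactly when the bold state flips, with no mask and no second scan.
import Mathlib
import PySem

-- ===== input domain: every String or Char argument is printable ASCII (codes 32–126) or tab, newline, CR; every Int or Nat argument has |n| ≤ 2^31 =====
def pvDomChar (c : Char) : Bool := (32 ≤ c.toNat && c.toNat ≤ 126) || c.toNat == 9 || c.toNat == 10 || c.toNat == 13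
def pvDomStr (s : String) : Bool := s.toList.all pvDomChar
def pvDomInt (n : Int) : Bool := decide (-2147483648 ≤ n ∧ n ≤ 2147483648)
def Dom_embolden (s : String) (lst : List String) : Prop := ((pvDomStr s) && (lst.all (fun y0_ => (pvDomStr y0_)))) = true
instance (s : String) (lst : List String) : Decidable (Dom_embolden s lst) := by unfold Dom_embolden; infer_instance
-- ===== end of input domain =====

-- B replaces A's mask-then-rescan (per-word window scan filling a boolean mask, then a
-- second two-level while loop over the mask) by ONE fused left-to-right pass keeping the
-- furthest reach of any match started so far and emitting tags when the bold state flips.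

-- ===== PORT A =====
-- bold = [False for i in range(len(s))]; nested loops marking every matched window
def aBold (cs : List Char) (lst : List String) : List Bool :=
  lst.foldl (fun bold x =>
    (PySem.List.pyRange 0 ((cs.length : Int) - (x.toList.length : Int) + 1) 1).foldl
      (fun bold i =>
        if PySem.List.slice cs (some i) (some (i + (x.toList.length : Int))) = x.toList then
          (PySem.List.pyRange i (i + (x.toList.length : Int)) 1).foldl
            (fun b j => PySem.List.pySetD b j true) bold
        else bold)
      bold)
    ((PySem.List.pyRange 0 (cs.length : Int) 1).map (fun _ => false))

-- the inner `while bold[i] and i < len(bold)` run: consume chars while the flag is true.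
-- (Python tests bold[i] FIRST and so raises IndexError when a run reaches the end of s;
-- those inputs are excluded by Pre_embolden — there the port simply stops at the list end.)
def aRun : List (Bool × Char) → List Char × List (Bool × Char)
  | [] => ([], [])
  | (b, c) :: rest =>
    if b then
      let r := aRun rest
      (c :: r.1, r.2)
    else ([], (b, c) :: rest)

theorem aRun_length_le : ∀ l : List (Bool × Char), (aRun l).2.length ≤ l.length := by
  intro l
  induction l with
  | nil => simp [aRun]
  | cons p rest ih =>
    obtain ⟨b, c⟩ := p
    by_cases hb : b
    · simpa [aRun, hb] using Nat.le_succ_of_le ih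
    · simp [aRun, hb]

-- the outer `while i < len(bold)` loop of A, walking the (bold, char) pairs in step
def aRender : List (Bool × Char) → List Char
  | [] => []
  | (b, c) :: rest =>
    if hb : b then
      let r := aRun ((b, c) :: rest)
      ("<b>".toList ++ r.1 ++ "</b>".toList) ++ aRender r.2
    else
      c :: aRender rest
  termination_by l => l.length
  decreasing_by
    · simp [aRun, hb]
      exact aRun_length_le rest
    · simp

def embolden (s : String) (lst : List String) : String :=
  String.ofList (aRender ((aBold s.toList lst).zip s.toList))

-- ===== PORT B =====
-- inner `for x in words: if s.startswith(x, i): e = i + len(x); if e > end: end = e`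
-- (s.startswith(x, i) with 0 ≤ i is exactly: x is a prefix of the i-th suffix — exact here)
def bStep (cs : List Char) (words : List (List Char)) (i : Nat) (e : Nat) : Nat :=
  words.foldl (fun e x =>
    if PySem.Chars.startswith (cs.drop i) x then
      if i + x.length > e then i + x.length else e
    else e) e

-- the fused `for i in range(n)` loop of B (s[i] with 0 ≤ i < n is cs.getD i — exact here)
def bGo (cs : List Char) (words : List (List Char)) (n i : Nat)
    (endv : Nat) (bolded : Bool) (output : List Char) : List Char :=
  if i < n then
    let endv' := bStep cs words i endv
    if !bolded && decide (i < endv') then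
      bGo cs words n (i + 1) endv' true (output ++ "<b>".toList ++ [cs.getD i ' '])
    else if bolded && decide (endv' ≤ i) then
      bGo cs words n (i + 1) endv' false (output ++ "</b>".toList ++ [cs.getD i ' '])
    else
      bGo cs words n (i + 1) endv' bolded (output ++ [cs.getD i ' '])
  else
    if bolded then output ++ "</b>".toList else output
  termination_by n - i

def embolden_alt (s : String) (lst : List String) : String :=
  String.ofList
    (bGo s.toList ((lst.map String.toList).filter (fun x => x ≠ [])) s.toList.length 0 0 false [])

-- ===== PRECONDITION & SPEC =====
-- Pre_ excludes exactly the inputs on which A raises IndexError: some nonempty word of lst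
-- is a suffix of s, so A's inner `while bold[i] and i < len(bold)` reads bold[len(bold)].
def Pre_embolden (s : String) (lst : List String) : Prop :=
  ∀ x ∈ lst, x.toList ≠ [] → PySem.Chars.endswith s.toList x.toList = false
instance (s : String) (lst : List String) : Decidable (Pre_embolden s lst) := by
  unfold Pre_embolden; infer_instance

def pvWitness_embolden : String × List String := ("abcdefg", ["bc", "cde", "x"])

def Spec_embolden (s : String) (lst : List String) (out : String) : Prop := out = embolden_alt s lst
instance (s : String) (lst : List String) (out : String) : Decidable (Spec_embolden s lst out) := by unfold Spec_embolden; infer_instance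

-- ===== CLAIM (what is proved, stated in full; the proofs are below) =====
def Claim_equal_embolden : Prop := ∀ (s : String) (lst : List String), Dom_embolden s lst → Pre_embolden s lst → Spec_embolden s lst (embolden s lst)


-- ===== LEMMAS AND PROOFS =====
-- spec-side pivot
def covB (cs : List Char) (words : List (List Char)) (j : Nat) : Bool :=
  words.any fun x => (List.range (j+1)).any fun i => x.isPrefixOf (cs.drop i) && decide (j < i + x.length)

def Efun (cs : List Char) (words : List (List Char)) (i : Nat) : Nat :=
  (List.range i).foldl (fun e i' => bStep cs words i' e) 0

def flagRender : List (Bool × Char) → Bool → List Char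
  | [], o => if o then "</b>".toList else []
  | (b, c) :: rest, o =>
    if o then
      if b then c :: flagRender rest true else "</b>".toList ++ c :: flagRender rest false
    else
      if b then "<b>".toList ++ c :: flagRender rest true else c :: flagRender rest false

theorem bStep_lt_iff (cs : List Char) (words : List (List Char)) (i : Nat) :
    ∀ (e j : Nat), (j < bStep cs words i e) ↔
      (j < e ∨ ∃ x ∈ words, x <+: cs.drop i ∧ j < i + x.length) := by
  unfold bStep
  induction words with
  | nil => simp
  | cons x ws ih =>
    intro e j
    simp only [List.foldl_cons]
    rw [ih]
    simp only [List.mem_cons]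
    cases hs : PySem.Chars.startswith (cs.drop i) x with
    | true =>
      have hpre : x <+: cs.drop i := (PySem.Chars.startswith_iff _ _).mp hs
      rw [if_pos rfl]
      constructor
      · rintro (h | ⟨y, hy, h1, h2⟩)
        · split_ifs at h with hgt
          · exact Or.inr ⟨x, Or.inl rfl, hpre, h⟩
          · exact Or.inl h
        · exact Or.inr ⟨y, Or.inr hy, h1, h2⟩
      · rintro (h | ⟨y, (rfl | hy), h1, h2⟩)
        · split_ifs with hgt
          · exact Or.inl (by omega)
          · exact Or.inl h
        · split_ifs with hgt
          · exact Or.inl h2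
          · exact Or.inl (by omega)
        · exact Or.inr ⟨y, hy, h1, h2⟩
    | false =>
      have hpre : ¬ (x <+: cs.drop i) := fun h =>
        by simp [(PySem.Chars.startswith_iff _ _).mpr h] at hs
      rw [if_neg (by simp)]
      constructor
      · rintro (h | ⟨y, hy, h1, h2⟩)
        · exact Or.inl h
        · exact Or.inr ⟨y, Or.inr hy, h1, h2⟩
      · rintro (h | ⟨y, (rfl | hy), h1, h2⟩)
        · exact Or.inl h
        · exact absurd h1 hpre
        · exact Or.inr ⟨y, hy, h1, h2⟩

theorem Efun_succ (cs : List Char) (words : List (List Char)) (i : Nat) :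
    Efun cs words (i+1) = bStep cs words i (Efun cs words i) := by
  simp [Efun, List.range_succ]

theorem lt_Efun_iff (cs : List Char) (words : List (List Char)) :
    ∀ (k j : Nat), (j < Efun cs words k) ↔
      ∃ i < k, ∃ x ∈ words, x <+: cs.drop i ∧ j < i + x.length := by
  intro k
  induction k with
  | zero => simp [Efun]
  | succ k ih =>
    intro j
    rw [Efun_succ, bStep_lt_iff, ih]
    constructor
    · rintro (⟨i, hi, h⟩ | h)
      · exact ⟨i, by omega, h⟩
      · exact ⟨k, by omega, h⟩
    · rintro ⟨i, hi, h⟩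
      rcases Nat.lt_succ_iff_lt_or_eq.mp hi with hi' | rfl
      · exact Or.inl ⟨i, hi', h⟩
      · exact Or.inr h

theorem covB_eq (cs : List Char) (words : List (List Char)) (j : Nat) :
    covB cs words j = decide (j < Efun cs words (j+1)) := by
  have : (covB cs words j = true) ↔ (j < Efun cs words (j+1)) := by
    rw [lt_Efun_iff]
    simp only [covB, List.any_eq_true, List.mem_range, Bool.and_eq_true, decide_eq_true_eq,
      List.isPrefixOf_iff_prefix]
    constructor
    · rintro ⟨x, hx, i, hi, h1, h2⟩
      exact ⟨i, by omega, x, hx, h1, h2⟩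
    · rintro ⟨i, hi, x, hx, h1, h2⟩
      exact ⟨x, hx, i, by omega, h1, h2⟩
  rcases Bool.eq_false_or_eq_true (covB cs words j) with h | h <;>
    simp [h] at this ⊢ <;> simpa using this

theorem aRun_eq : ∀ l : List (Bool × Char),
    aRun l = ((l.takeWhile (·.1)).map (·.2), l.dropWhile (·.1)) := by
  intro l
  induction l with
  | nil => simp [aRun]
  | cons p rest ih =>
    obtain ⟨b, c⟩ := p
    cases b with
    | true => simp [aRun, ih]
    | false => simp [aRun]

theorem flagRender_true : ∀ l : List (Bool × Char),
    flagRender l true =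
      (l.takeWhile (·.1)).map (·.2) ++ "</b>".toList ++ flagRender (l.dropWhile (·.1)) false := by
  intro l
  induction l with
  | nil => simp [flagRender]
  | cons p rest ih =>
    obtain ⟨b, c⟩ := p
    cases b with
    | true => simp [flagRender, ih]
    | false => simp [flagRender]

theorem aRender_eq_flag : ∀ l : List (Bool × Char), aRender l = flagRender l false := by
  have main : ∀ (N : Nat) (l : List (Bool × Char)), l.length ≤ N → aRender l = flagRender l false := by
    intro N
    induction N with
    | zero => intro l hl; rw [List.length_eq_zero_iff.mp (Nat.le_zero.mp hl)]; simp [aRender, flagRender]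
    | succ N ih =>
      intro l hl
      match l with
      | [] => simp [aRender, flagRender]
      | (b, c) :: rest =>
        simp only [List.length_cons, Nat.succ_le_succ_iff] at hl
        cases b with
        | false =>
          rw [aRender, flagRender]
          simp [ih rest hl]
        | true =>
          rw [aRender, flagRender]
          have hd := ih (rest.dropWhile (·.1)) (le_trans (List.length_dropWhile_le _ _) hl)
          simp [aRun_eq, flagRender_true, hd]
  exact fun l => main l.length l le_rfl

theorem bGo_eq (cs : List Char) (words : List (List Char)) :
    ∀ (K i : Nat), i + K = cs.length → ∀ (o : Bool) (out : List Char),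
      bGo cs words cs.length i (Efun cs words i) o out =
        out ++ flagRender ((((List.range cs.length).map (covB cs words)).drop i).zip (cs.drop i)) o := by
  intro K
  induction K with
  | zero =>
    intro i hi o out
    rw [bGo, if_neg (by omega)]
    have hd : ((List.range cs.length).map (covB cs words)).drop i = [] :=
      List.drop_eq_nil_of_le (by simp; omega)
    cases o <;> simp [flagRender, hd]
  | succ K ih =>
    intro i hi o out
    have hin : i < cs.length := by omega
    have hmask : ((List.range cs.length).map (covB cs words)).drop i
        = covB cs words i :: ((List.range cs.length).map (covB cs words)).drop (i+1) := by
      rw [List.drop_eq_getElem_cons (by simpa using hin)]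
      simp
    have hcs : cs.drop i = cs[i] :: cs.drop (i+1) := List.drop_eq_getElem_cons hin
    have hE : bStep cs words i (Efun cs words i) = Efun cs words (i+1) := (Efun_succ cs words i).symm
    have hgd : cs.getD i ' ' = cs[i] := List.getD_eq_getElem cs ' ' hin
    have hih := ih (i+1) (by omega)
    rw [bGo, if_pos hin]
    simp only [hE, hgd, hmask, hcs]
    rw [List.zip_cons_cons]
    cases o with
    | false =>
      cases hcov : covB cs words i with
      | true =>
        have hlt : i < Efun cs words (i+1) := by
          have := covB_eq cs words i; rw [hcov] at this; exact of_decide_eq_true this.symm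
        rw [if_pos (by simp [hlt])]
        rw [hih true (out ++ "<b>".toList ++ [cs[i]])]
        simp [flagRender]
      | false =>
        have hge : ¬ i < Efun cs words (i+1) := by
          have := covB_eq cs words i; rw [hcov] at this
          simpa using of_decide_eq_false this.symm
        rw [if_neg (by simp [hge]), if_neg (by simp)]
        rw [hih false (out ++ [cs[i]])]
        simp [flagRender]
    | true =>
      cases hcov : covB cs words i with
      | true =>
        have hlt : i < Efun cs words (i+1) := by
          have := covB_eq cs words i; rw [hcov] at this; exact of_decide_eq_true this.symm
        rw [if_neg (by simp), if_neg (by simp; omega)]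
        rw [hih true (out ++ [cs[i]])]
        simp [flagRender]
      | false =>
        have hge : ¬ i < Efun cs words (i+1) := by
          have := covB_eq cs words i; rw [hcov] at this
          simpa using of_decide_eq_false this.symm
        rw [if_neg (by simp), if_pos (by simp; omega)]
        rw [hih false (out ++ "</b>".toList ++ [cs[i]])]
        simp [flagRender]

theorem getD_set_bool (b : List Bool) (nn j : Nat) (v d : Bool) (h : nn < b.length) :
    (b.set nn v).getD j d = if j = nn then v else b.getD j d := by
  by_cases hj : j = nn
  · subst hj; simp [List.getD_eq_getElem?_getD, List.getElem?_set, h]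
  · simp [List.getD_eq_getElem?_getD, List.getElem?_set, Ne.symm hj, hj]

theorem len_setfold : ∀ (idxs : List Int) (b : List Bool),
    (idxs.foldl (fun b j => PySem.List.pySetD b j true) b).length = b.length := by
  intro idxs
  induction idxs with
  | nil => simp
  | cons i rest ih => intro b; simp [ih, PySem.List.length_pySetD]

theorem setRange_getD : ∀ (m i : Nat) (b : List Bool) (j : Nat), i + m ≤ b.length →
    (((List.range m).map (fun (k : Nat) => (i : Int) + (k : Int))).foldl
        (fun b j => PySem.List.pySetD b j true) b).getD j false
      = (b.getD j false || decide (i ≤ j ∧ j < i + m)) := by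
  intro m
  induction m with
  | zero => intro i b j _; simp
  | succ m ih =>
    intro i b j hb
    rw [List.range_succ, List.map_append, List.foldl_append]
    simp only [List.map_cons, List.map_nil, List.foldl_cons, List.foldl_nil]
    have hcast : (i : Int) + (m : Int) = ((i + m : Nat) : Int) := by push_cast; ring
    rw [hcast, PySem.List.pySetD_natCast]
    have hlen : (((List.range m).map (fun (k : Nat) => (i : Int) + (k : Int))).foldl
        (fun b j => PySem.List.pySetD b j true) b).length = b.length := len_setfold _ b
    rw [getD_set_bool _ _ _ _ _ (by omega)]
    rw [ih i b j (by omega)]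
    by_cases hj : j = i + m
    · subst hj; simp
    · rw [if_neg hj]
      by_cases hw : i ≤ j ∧ j < i + m
      · have h2 : i ≤ j ∧ j < i + (m + 1) := by omega
        simp [hw, h2]
      · have h2 : ¬ (i ≤ j ∧ j < i + (m + 1)) := by omega
        simp [hw, h2]

theorem pyRange_zero_eq (u : Int) :
    PySem.List.pyRange 0 u 1 = (List.range u.toNat).map (fun (k : Nat) => (k : Int)) := by
  rw [PySem.List.pyRange_one]; simp

theorem pyRange_add_eq (i : Int) (m : Nat) :
    PySem.List.pyRange i (i + (m : Int)) 1 = (List.range m).map (fun (k : Nat) => i + (k : Int)) := by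
  rw [PySem.List.pyRange_one]; simp

theorem midfold (cs : List Char) (xs : List Char) :
    ∀ (K : Nat) (b : List Bool), b.length = cs.length →
      (∀ i : Nat, i < K → i + xs.length ≤ cs.length) →
      ((((List.range K).map (fun (k : Nat) => (k : Int))).foldl (fun bold i =>
          if PySem.List.slice cs (some i) (some (i + (xs.length : Int))) = xs then
            (PySem.List.pyRange i (i + (xs.length : Int)) 1).foldl
              (fun b j => PySem.List.pySetD b j true) bold
          else bold) b).length = cs.length ∧
       ∀ j : Nat, (((List.range K).map (fun (k : Nat) => (k : Int))).foldl (fun bold i =>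
          if PySem.List.slice cs (some i) (some (i + (xs.length : Int))) = xs then
            (PySem.List.pyRange i (i + (xs.length : Int)) 1).foldl
              (fun b j => PySem.List.pySetD b j true) bold
          else bold) b).getD j false
        = (b.getD j false || (List.range K).any (fun i =>
            decide (PySem.List.slice cs (some (i : Int)) (some ((i : Int) + (xs.length : Int))) = xs)
            && decide (i ≤ j ∧ j < i + xs.length)))) := by
  intro K
  induction K with
  | zero => intro b hb _; simp [hb]
  | succ K ih =>
    intro b hb hK
    obtain ⟨ihlen, ihget⟩ := ih b hb (fun i hi => hK i (by omega))
    rw [List.range_succ, List.map_append, List.foldl_append]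
    simp only [List.map_cons, List.map_nil, List.foldl_cons, List.foldl_nil]
    by_cases hsl : PySem.List.slice cs (some ((K : Nat) : Int)) (some (((K : Nat) : Int) + (xs.length : Int))) = xs
    · rw [if_pos hsl]
      rw [pyRange_add_eq]
      constructor
      · rw [len_setfold]; exact ihlen
      · intro j
        rw [setRange_getD xs.length K _ j (by rw [ihlen]; exact hK K (by omega))]
        rw [ihget j]
        simp [List.range_succ, hsl, Bool.or_assoc]
    · rw [if_neg hsl]
      refine ⟨ihlen, fun j => ?_⟩
      rw [ihget j]
      simp [List.range_succ, hsl]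

theorem aBold_charac (cs : List Char) :
    ∀ (lst : List String) (b : List Bool), b.length = cs.length →
      ((lst.foldl (fun bold x =>
          (PySem.List.pyRange 0 ((cs.length : Int) - (x.toList.length : Int) + 1) 1).foldl
            (fun bold i =>
              if PySem.List.slice cs (some i) (some (i + (x.toList.length : Int))) = x.toList then
                (PySem.List.pyRange i (i + (x.toList.length : Int)) 1).foldl
                  (fun b j => PySem.List.pySetD b j true) bold
              else bold) bold) b).length = cs.length ∧
       ∀ j : Nat, (lst.foldl (fun bold x =>
          (PySem.List.pyRange 0 ((cs.length : Int) - (x.toList.length : Int) + 1) 1).foldl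
            (fun bold i =>
              if PySem.List.slice cs (some i) (some (i + (x.toList.length : Int))) = x.toList then
                (PySem.List.pyRange i (i + (x.toList.length : Int)) 1).foldl
                  (fun b j => PySem.List.pySetD b j true) bold
              else bold) bold) b).getD j false
        = (b.getD j false || lst.any (fun x =>
            (List.range (((cs.length : Int) - (x.toList.length : Int) + 1).toNat)).any (fun i =>
              decide (PySem.List.slice cs (some (i : Int)) (some ((i : Int) + (x.toList.length : Int))) = x.toList)
              && decide (i ≤ j ∧ j < i + x.toList.length))))) := by
  intro lst
  induction lst with
  | nil => intro b hb; simp [hb]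
  | cons x rest ih =>
    intro b hb
    simp only [List.foldl_cons]
    have hmid := midfold cs x.toList (((cs.length : Int) - (x.toList.length : Int) + 1).toNat) b hb
      (by intro i hi; omega)
    rw [pyRange_zero_eq]
    obtain ⟨hlen, hget⟩ := hmid
    obtain ⟨ihlen, ihget⟩ := ih _ hlen
    refine ⟨ihlen, fun j => ?_⟩
    rw [ihget j, hget j]
    simp [Bool.or_assoc]

theorem bridge (cs : List Char) (lst : List String) (j : Nat) (_hj : j < cs.length) :
    lst.any (fun x =>
        (List.range (((cs.length : Int) - (x.toList.length : Int) + 1).toNat)).any (fun i =>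
          decide (PySem.List.slice cs (some (i : Int)) (some ((i : Int) + (x.toList.length : Int))) = x.toList)
          && decide (i ≤ j ∧ j < i + x.toList.length)))
      = covB cs ((lst.map String.toList).filter (fun x => x ≠ [])) j := by
  apply Bool.eq_iff_iff.mpr
  simp only [covB, List.any_eq_true, List.mem_range, Bool.and_eq_true, decide_eq_true_eq,
    List.mem_filter, List.mem_map, List.isPrefixOf_iff_prefix]
  have hslice : ∀ (i m : Nat), PySem.List.slice cs (some (i : Int)) (some ((i : Int) + (m : Int)))
      = (cs.drop i).take m := fun i m => by
    simpa using PySem.List.slice_natCast_add (xs := cs) (j := i) (n := m)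
  constructor
  · rintro ⟨x, hx, i, hiK, hsl, hij, hjm⟩
    refine ⟨x.toList, ⟨⟨x, hx, rfl⟩, List.ne_nil_of_length_pos (by omega)⟩, i, by omega, ?_, by omega⟩
    rw [hslice] at hsl
    rw [← hsl]
    exact List.take_prefix _ _
  · rintro ⟨xs, ⟨⟨x, hx, rfl⟩, hne⟩, i, hij, hpre, hjm⟩
    have htk : x.toList = (cs.drop i).take x.toList.length :=
      List.prefix_iff_eq_take.mp hpre
    have hlen : x.toList.length ≤ cs.length - i := by
      have := hpre.length_le
      simpa using this
    have hile : i ≤ cs.length := by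
      by_contra h
      have hnil : cs.drop i = [] := List.drop_eq_nil_of_le (by omega)
      rw [hnil] at hpre
      exact hne (List.prefix_nil.mp hpre)
    exact ⟨x, hx, i, by omega, by rw [hslice]; exact htk.symm, by omega, by omega⟩

theorem mask_eq (cs : List Char) (lst : List String) :
    aBold cs lst = (List.range cs.length).map
      (covB cs ((lst.map String.toList).filter (fun x => x ≠ []))) := by
  have hinit_len : ((PySem.List.pyRange 0 (cs.length : Int) 1).map (fun _ => false)).length
      = cs.length := by
    simp [PySem.List.length_pyRange_one]
  have h := aBold_charac cs lst _ hinit_len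
  have hinitD : ∀ j : Nat,
      ((PySem.List.pyRange 0 (cs.length : Int) 1).map (fun _ => false)).getD j false = false := by
    intro j
    rw [List.getD_eq_getElem?_getD, List.getElem?_map]
    cases (PySem.List.pyRange 0 (cs.length : Int) 1)[j]? <;> simp
  have hlen : (aBold cs lst).length = cs.length := h.1
  apply List.ext_getElem (by simpa using hlen)
  intro j h1 h2
  have hj : j < cs.length := by omega
  have := h.2 j
  rw [hinitD j, Bool.false_or] at this
  rw [← List.getD_eq_getElem (aBold cs lst) false h1]
  unfold aBold
  rw [this, bridge cs lst j hj]
  simp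

theorem ports_agree (s : String) (lst : List String) : embolden s lst = embolden_alt s lst := by
  unfold embolden embolden_alt
  congr 1
  rw [mask_eq, aRender_eq_flag]
  have hb := bGo_eq s.toList ((lst.map String.toList).filter (fun x => x ≠ []))
    s.toList.length 0 (by omega) false []
  rw [show Efun s.toList ((lst.map String.toList).filter (fun x => x ≠ [])) 0 = 0 from by
    simp [Efun]] at hb
  rw [hb]
  simp

-- ===== VERDICT (by name: the statement is the Claim_ definition above) =====
theorem embolden_spec : Claim_equal_embolden := by
  intro s lst _ _
  exact ports_agree s lst
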